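-- pv_equiv track=rewrite | github.com/Rodeffs/Year3_Programming | Travelling_Salesman/bounds_branches_method/bounds_branches.py | sort_path
-- ===== SOURCE A (Python) =====
-- def sort_path(unsorted_path):  # сортировка путей
--     sorted_path = []
--     n = len(unsorted_path)
--
--     # Пример: был путь [[(A, B), (B, C)], [(D, E), (E, F), (F, G)]]. Добавили элемент [(C, D)]. Стало [[(A, B), (B, C)], [(D, E), (E, F), (F, G)], [(C, D)]]. По итогу должно получиться [[(A, B), (B, C), (C, D), (D, E), (E, F), (F, G)]]
--
--     while n > 0:
--         full_path = unsorted_path[0]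
--         start, end = full_path[0][0], full_path[-1][1]
--         unsorted_path.pop(0)
--         n -= 1
--         i = 0
--
--         while i < n:
--             cur_path = unsorted_path[i]
--             cur_start, cur_end = cur_path[0][0], cur_path[-1][1]
--
--             if cur_end == start:
--                 full_path = cur_path + full_path
--                 start = cur_start
--                 unsorted_path.pop(i)
--                 n -= 1
--                 i = 0
--
--             elif cur_start == end:
--                 full_path = full_path + cur_path
--                 end = cur_end
--                 unsorted_path.pop(i)
--                 n -= 1
--                 i = 0
--
--             else:
--                 i += 1
--
--         sorted_path.append(full_path)
--
--     return sorted_path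
-- ===== SOURCE B (Python) =====
-- def sort_path(unsorted_path):
--     # Pure recursive re-implementation: an extraction helper pulls out the first
--     # segment that attaches to either endpoint of the growing chain; no index
--     # juggling, no in-place mutation (A empties its argument; B leaves it intact).
--     def find(start, end, rest):
--         for i, seg in enumerate(rest):
--             if seg[-1][1] == start:
--                 return True, seg, rest[:i] + rest[i + 1:]
--             if seg[0][0] == end:
--                 return False, seg, rest[:i] + rest[i + 1:]
--         return None
--
--     def grow(chain, start, end, rest):
--         found = find(start, end, rest)
--         if found is None:
--             return chain, rest
--         left, seg, rest = found
--         if left: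
--             return grow(seg + chain, seg[0][0], end, rest)
--         return grow(chain + seg, start, seg[-1][1], rest)
--
--     result = []
--     rest = list(unsorted_path)
--     while rest:
--         first, rest = rest[0], rest[1:]
--         chain, rest = grow(first, first[0][0], first[-1][1], rest)
--         result.append(chain)
--     return result
-- ===== Notes on version B (the rewrite author's own statement) =====
-- stated objective: simpler
-- what changed: Replaces A's in-place pop/index-reset double while-loop with a pure recursive decomposition: a single 'find first attachable segment' helper plus a recursive chain-grower, no mutation (A empties its argument list; B leaves it untouched).
import Mathlib
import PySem

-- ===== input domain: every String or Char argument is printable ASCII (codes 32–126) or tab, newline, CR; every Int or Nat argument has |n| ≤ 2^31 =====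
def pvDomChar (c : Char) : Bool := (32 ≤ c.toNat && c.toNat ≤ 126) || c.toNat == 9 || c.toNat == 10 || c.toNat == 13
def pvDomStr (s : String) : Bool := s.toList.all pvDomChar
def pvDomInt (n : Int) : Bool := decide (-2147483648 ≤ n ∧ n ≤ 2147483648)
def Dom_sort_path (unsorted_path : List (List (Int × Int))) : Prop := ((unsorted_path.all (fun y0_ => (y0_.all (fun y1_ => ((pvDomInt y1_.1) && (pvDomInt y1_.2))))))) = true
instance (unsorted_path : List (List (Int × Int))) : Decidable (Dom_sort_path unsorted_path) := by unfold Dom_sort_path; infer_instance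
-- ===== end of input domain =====

-- B is a pure recursive rewrite of A (a find-first-attachable helper instead of A's
-- in-place pop/index-reset loops); equivalence is about the RETURN value only: A
-- empties its argument list in place, B does not mutate it.
-- (Both ports use a fuel counter, always supplied large enough, purely as a
--  structural-recursion totality guard; neither changes any computed value.)

-- ===== PORT A =====
-- inner while-loop of A: state (full_path, start, end, remaining list, index i);
-- pop(i) is eraseIdx, a merge resets i to 0, segment endpoints via pyGet? (the getD
-- default is unreachable under Pre_, where every segment is nonempty)
def sortInnerA : Nat → List (Int × Int) → Int → Int → List (List (Int × Int)) → Nat →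
    List (Int × Int) × List (List (Int × Int))
  | 0, fp, _, _, rest, _ => (fp, rest)
  | fuel + 1, fp, s, e, rest, i =>
    if h : i < rest.length then
      if ((PySem.List.pyGet? rest[i] (-1)).getD (0,0)).2 = s then
        sortInnerA fuel (rest[i] ++ fp) (((PySem.List.pyGet? rest[i] 0).getD (0,0)).1) e
          (rest.eraseIdx i) 0
      else if ((PySem.List.pyGet? rest[i] 0).getD (0,0)).1 = e then
        sortInnerA fuel (fp ++ rest[i]) s (((PySem.List.pyGet? rest[i] (-1)).getD (0,0)).2)
          (rest.eraseIdx i) 0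
      else
        sortInnerA fuel fp s e rest (i + 1)
    else (fp, rest)

-- outer while-loop of A: take the head, grow it, append the chain
def sortOuterA : Nat → List (List (Int × Int)) → List (List (Int × Int))
  | _, [] => []
  | 0, _ :: _ => []
  | fuel + 1, fp :: rest =>
    let r := sortInnerA (rest.length * rest.length + rest.length + rest.length + 1) fp
      (((PySem.List.pyGet? fp 0).getD (0,0)).1) (((PySem.List.pyGet? fp (-1)).getD (0,0)).2) rest 0
    r.1 :: sortOuterA fuel r.2

def sort_path (unsorted_path : List (List (Int × Int))) : List (List (Int × Int)) :=
  sortOuterA unsorted_path.length unsorted_path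

-- ===== PORT B =====
def segStart (seg : List (Int × Int)) : Int := ((PySem.List.pyGet? seg 0).getD (0,0)).1
def segEnd (seg : List (Int × Int)) : Int := ((PySem.List.pyGet? seg (-1)).getD (0,0)).2

-- Source B's find: the first segment attaching to either endpoint, with the list minus it
def findSeg (s e : Int) : List (List (Int × Int)) →
    Option (Bool × List (Int × Int) × List (List (Int × Int)))
  | [] => none
  | seg :: rest =>
    if segEnd seg = s then some (true, seg, rest)
    else if segStart seg = e then some (false, seg, rest)
    else
      match findSeg s e rest with
      | some (b, sg, r) => some (b, sg, seg :: r)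
      | none => none

-- Source B's grow: repeatedly extract the first attachable segment
def growChain : Nat → List (Int × Int) → Int → Int → List (List (Int × Int)) →
    List (Int × Int) × List (List (Int × Int))
  | 0, chain, _, _, rest => (chain, rest)
  | fuel + 1, chain, s, e, rest =>
    match findSeg s e rest with
    | none => (chain, rest)
    | some (true, seg, r) => growChain fuel (seg ++ chain) (segStart seg) e r
    | some (false, seg, r) => growChain fuel (chain ++ seg) s (segEnd seg) r

def altOuter : Nat → List (List (Int × Int)) → List (List (Int × Int))
  | _, [] => []
  | 0, _ :: _ => []
  | fuel + 1, first :: rest =>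
    let g := growChain (rest.length + 1) first (segStart first) (segEnd first) rest
    g.1 :: altOuter fuel g.2

def sort_path_alt (unsorted_path : List (List (Int × Int))) : List (List (Int × Int)) :=
  altOuter unsorted_path.length unsorted_path

-- ===== PRECONDITION & SPEC =====
-- Pre_ excludes inputs containing an empty segment: there Python A raises
-- IndexError on seg[0]/seg[-1] (and so does Source B).
def Pre_sort_path (unsorted_path : List (List (Int × Int))) : Prop :=
  ∀ seg ∈ unsorted_path, seg ≠ []
instance (unsorted_path : List (List (Int × Int))) : Decidable (Pre_sort_path unsorted_path) := by
  unfold Pre_sort_path; infer_instance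

def pvWitness_sort_path : (List (List (Int × Int))) :=
  [[(3, 4)], [(1, 2), (2, 3)], [(5, 6), (6, 7)], [(4, 5)]]

def Spec_sort_path (unsorted_path : List (List (Int × Int))) (out : List (List (Int × Int))) : Prop := out = sort_path_alt unsorted_path
instance (unsorted_path : List (List (Int × Int))) (out : List (List (Int × Int))) : Decidable (Spec_sort_path unsorted_path out) := by unfold Spec_sort_path; infer_instance

-- ===== CLAIM (what is proved, stated in full; the proofs are below) =====
def Claim_equal_sort_path : Prop := ∀ (unsorted_path : List (List (Int × Int))), Dom_sort_path unsorted_path → Pre_sort_path unsorted_path → Spec_sort_path unsorted_path (sort_path unsorted_path)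

-- ===== LEMMAS AND PROOFS =====

theorem eraseIdx_length_lt : (l : List (List (Int × Int))) → (i : Nat) → i < l.length →
    (l.eraseIdx i).length < l.length
  | _ :: _, 0, _ => Nat.lt_succ_of_le (Nat.le_refl _)
  | _ :: l, i + 1, h => Nat.succ_lt_succ (eraseIdx_length_lt l i (Nat.lt_of_succ_lt_succ h))

theorem findSeg_length (s e : Int) (l : List (List (Int × Int)))
    (b : Bool) (sg : List (Int × Int)) (r : List (List (Int × Int)))
    (h : findSeg s e l = some (b, sg, r)) : r.length < l.length := by
  induction l generalizing r with
  | nil => simp [findSeg] at h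
  | cons seg rest ih =>
    rw [findSeg] at h
    split_ifs at h with h1 h2
    · simp_all
    · simp_all
    · revert h
      match hm : findSeg s e rest with
      | some (b', sg', r') =>
        intro h
        obtain ⟨rfl, rfl, rfl⟩ : b' = b ∧ sg' = sg ∧ seg :: r' = r := by simpa using h
        simpa using Nat.succ_lt_succ (ih r' hm)
      | none => intro h; simp at h

-- growChain's result does not depend on the fuel, as long as it exceeds rest.length
theorem growChain_fuel_irrel (k : Nat) : ∀ (k₁ k₂ : Nat) (chain : List (Int × Int)) (s e : Int)
    (rest : List (List (Int × Int))), rest.length ≤ k → rest.length < k₁ → rest.length < k₂ →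
    growChain k₁ chain s e rest = growChain k₂ chain s e rest := by
  induction k with
  | zero =>
    intro k₁ k₂ chain s e rest hk h₁ h₂
    obtain ⟨m₁, rfl⟩ : ∃ m, k₁ = m + 1 := ⟨k₁ - 1, by omega⟩
    obtain ⟨m₂, rfl⟩ : ∃ m, k₂ = m + 1 := ⟨k₂ - 1, by omega⟩
    have hrest : rest = [] := List.length_eq_zero_iff.mp (by omega)
    subst hrest
    rfl
  | succ k ih =>
    intro k₁ k₂ chain s e rest hk h₁ h₂
    obtain ⟨m₁, rfl⟩ : ∃ m, k₁ = m + 1 := ⟨k₁ - 1, by omega⟩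
    obtain ⟨m₂, rfl⟩ : ∃ m, k₂ = m + 1 := ⟨k₂ - 1, by omega⟩
    rw [growChain, growChain]
    match hm : findSeg s e rest with
    | none => rfl
    | some (true, seg, r) =>
      have hr := findSeg_length s e rest _ _ _ hm
      exact ih m₁ m₂ (seg ++ chain) (segStart seg) e r (by omega) (by omega) (by omega)
    | some (false, seg, r) =>
      have hr := findSeg_length s e rest _ _ _ hm
      exact ih m₁ m₂ (chain ++ seg) s (segEnd seg) r (by omega) (by omega) (by omega)

-- if nothing attaches, find returns none
theorem findSeg_none (s e : Int) (l : List (List (Int × Int)))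
    (h : ∀ seg ∈ l, segEnd seg ≠ s ∧ segStart seg ≠ e) : findSeg s e l = none := by
  induction l with
  | nil => rfl
  | cons seg rest ih =>
    have hseg := h seg (by simp)
    rw [findSeg, if_neg hseg.1, if_neg hseg.2, ih (fun x hx => h x (by simp [hx]))]

-- find returns the first attachable segment together with the list minus it
theorem findSeg_at (s e : Int) (l : List (List (Int × Int))) (i : Nat) (h : i < l.length)
    (hpre : ∀ j, j < i → ∀ (hj : j < l.length), segEnd l[j] ≠ s ∧ segStart l[j] ≠ e) :
    (segEnd l[i] = s → findSeg s e l = some (true, l[i], l.eraseIdx i)) ∧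
    (segEnd l[i] ≠ s → segStart l[i] = e → findSeg s e l = some (false, l[i], l.eraseIdx i)) := by
  induction l generalizing i with
  | nil => simp at h
  | cons seg rest ih =>
    cases i with
    | zero =>
      constructor
      · intro hc
        rw [findSeg, if_pos (by simpa using hc)]
        simp
      · intro hc1 hc2
        rw [findSeg, if_neg (by simpa using hc1), if_pos (by simpa using hc2)]
        simp
    | succ i =>
      have hseg : segEnd seg ≠ s ∧ segStart seg ≠ e := by
        simpa using hpre 0 (Nat.succ_pos i) (by simp)
      have hrec := ih i (by simpa using h)
        (fun j hj hj' => by simpa using hpre (j + 1) (by omega) (by simpa using hj'))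
      constructor
      · intro hc
        rw [findSeg, if_neg hseg.1, if_neg hseg.2, hrec.1 (by simpa using hc)]
        simp
      · intro hc1 hc2
        rw [findSeg, if_neg hseg.1, if_neg hseg.2,
          hrec.2 (by simpa using hc1) (by simpa using hc2)]
        simp

-- A's inner loop (from index i, with no match before i, with enough fuel) computes B's grow
theorem inner_eq (k : Nat) : ∀ (fp : List (Int × Int)) (s e : Int)
    (rest : List (List (Int × Int))) (i : Nat),
    rest.length * rest.length + rest.length + (rest.length - i) < k →
    (∀ j, j < i → ∀ (hj : j < rest.length), segEnd rest[j] ≠ s ∧ segStart rest[j] ≠ e) →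
    sortInnerA k fp s e rest i = growChain (rest.length + 1) fp s e rest := by
  induction k with
  | zero => intro fp s e rest i hk; omega
  | succ k ih =>
    intro fp s e rest i hk hpre
    rw [sortInnerA]
    by_cases h : i < rest.length
    · rw [dif_pos h]
      obtain ⟨m, hm⟩ : ∃ m, rest.length = m + 1 := ⟨rest.length - 1, by omega⟩
      have hL : (rest.eraseIdx i).length = m := by
        rw [List.length_eraseIdx, if_pos h, hm]
        exact Nat.succ_sub_one m
      have hke : (rest.eraseIdx i).length * (rest.eraseIdx i).length + (rest.eraseIdx i).length
          + ((rest.eraseIdx i).length - 0) < k := by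
        rw [hL]
        rw [hm] at hk
        have hexp : (m + 1) * (m + 1) = m * m + 2 * m + 1 := by ring
        rw [hexp] at hk
        generalize m * m = p at hk ⊢
        omega
      by_cases h1 : ((PySem.List.pyGet? rest[i] (-1)).getD (0,0)).2 = s
      · rw [if_pos h1]
        have hfind : findSeg s e rest = some (true, rest[i], rest.eraseIdx i) :=
          (findSeg_at s e rest i h hpre).1 h1
        rw [growChain, hfind]
        rw [ih _ _ _ _ _ hke (fun j hj _ => absurd hj (Nat.not_lt_zero j))]
        exact growChain_fuel_irrel ((rest.eraseIdx i).length) _ _ _ _ _ _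
          (Nat.le_refl _) (by omega) (by omega)
      · rw [if_neg h1]
        by_cases h2 : ((PySem.List.pyGet? rest[i] 0).getD (0,0)).1 = e
        · rw [if_pos h2]
          have hfind : findSeg s e rest = some (false, rest[i], rest.eraseIdx i) :=
            (findSeg_at s e rest i h hpre).2 h1 h2
          rw [growChain, hfind]
          rw [ih _ _ _ _ _ hke (fun j hj _ => absurd hj (Nat.not_lt_zero j))]
          exact growChain_fuel_irrel ((rest.eraseIdx i).length) _ _ _ _ _ _
            (Nat.le_refl _) (by omega) (by omega)
        · rw [if_neg h2]
          refine ih _ _ _ _ _ (by omega) (fun j hj hj' => ?_)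
          rcases Nat.lt_or_ge j i with hji | hji
          · exact hpre j hji hj'
          · have : j = i := by omega
            subst this
            exact ⟨h1, h2⟩
    · rw [dif_neg h]
      have hnone : findSeg s e rest = none := by
        apply findSeg_none
        intro seg hseg
        obtain ⟨j, hj, rfl⟩ := List.mem_iff_getElem.mp hseg
        exact hpre j (by omega) hj
      rw [growChain, hnone]

-- the inner loop (with enough fuel) only removes elements
theorem sortInnerA_length_le (k : Nat) : ∀ (fp : List (Int × Int)) (s e : Int)
    (rest : List (List (Int × Int))) (i : Nat),
    (sortInnerA k fp s e rest i).2.length ≤ rest.length := by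
  induction k with
  | zero => intro fp s e rest i; rw [sortInnerA]
  | succ k ih =>
    intro fp s e rest i
    rw [sortInnerA]
    by_cases h : i < rest.length
    · rw [dif_pos h]
      have hlen : (rest.eraseIdx i).length < rest.length := eraseIdx_length_lt rest i h
      by_cases h1 : ((PySem.List.pyGet? rest[i] (-1)).getD (0,0)).2 = s
      · rw [if_pos h1]
        exact (ih _ _ _ _ _).trans (Nat.le_of_lt hlen)
      · rw [if_neg h1]
        by_cases h2 : ((PySem.List.pyGet? rest[i] 0).getD (0,0)).1 = e
        · rw [if_pos h2]
          exact (ih _ _ _ _ _).trans (Nat.le_of_lt hlen)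
        · rw [if_neg h2]
          exact ih _ _ _ _ _
    · rw [dif_neg h]

-- both outer loops, run with any sufficient fuel, produce the same chain list
theorem outer_eq (k : Nat) : ∀ (l : List (List (Int × Int))), l.length ≤ k →
    sortOuterA k l = altOuter k l := by
  induction k with
  | zero =>
    intro l hl
    have : l = [] := List.length_eq_zero_iff.mp (by omega)
    subst this
    rfl
  | succ k ih =>
    intro l hl
    match l with
    | [] => rfl
    | fp :: rest =>
      rw [sortOuterA, altOuter]
      have hin := inner_eq (rest.length * rest.length + rest.length + rest.length + 1) fp
        (((PySem.List.pyGet? fp 0).getD (0,0)).1) (((PySem.List.pyGet? fp (-1)).getD (0,0)).2)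
        rest 0 (by omega) (fun j hj _ => absurd hj (Nat.not_lt_zero j))
      have hlen := sortInnerA_length_le (rest.length * rest.length + rest.length + rest.length + 1)
        fp (((PySem.List.pyGet? fp 0).getD (0,0)).1) (((PySem.List.pyGet? fp (-1)).getD (0,0)).2)
        rest 0
      rw [show segStart fp = ((PySem.List.pyGet? fp 0).getD (0,0)).1 from rfl,
          show segEnd fp = ((PySem.List.pyGet? fp (-1)).getD (0,0)).2 from rfl, ← hin]
      have hrec := ih (sortInnerA (rest.length * rest.length + rest.length + rest.length + 1) fp
        (((PySem.List.pyGet? fp 0).getD (0,0)).1) (((PySem.List.pyGet? fp (-1)).getD (0,0)).2)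
        rest 0).2 (by simp at hl; omega)
      exact congrArg₂ _ rfl hrec

-- ===== VERDICT (by name: the statement is the Claim_ definition above) =====
theorem sort_path_spec : Claim_equal_sort_path := by
  intro l _ _
  unfold Spec_sort_path sort_path sort_path_alt
  exact outer_eq l.length l (Nat.le_refl _)
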